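-- pv_equiv track=rewrite | github.com/EggheadJohnson/AdventOfCode2021 | day15/solutions.py | buildMultiMap
-- ===== SOURCE A (Python) =====
-- def buildMultiMap(input):
--     output = []
--     for y in range(5):
--         for inputRow in input:
--             outputRow = []
--             for x in range(5):
--                 outputRow.extend( [ i + x + y - 9 if i + x + y > 9 else i + x + y for i in inputRow ] )
--             output.append(outputRow)
--     return output
-- ===== SOURCE B (Python) =====
-- def buildMultiMap(input):
--     # Precompute, once per input row, its nine shifted/wrapped variants (shift s = x + y
--     # ranges over 0..8); each output row is then just a concatenation of five of them.
--     tables = [[[i + s - 9 if i + s > 9 else i + s for i in row] for s in range(9)]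
--               for row in input]
--     return [t[y] + t[y + 1] + t[y + 2] + t[y + 3] + t[y + 4]
--             for y in range(5) for t in tables]
-- ===== Notes on version B (the rewrite author's own statement) =====
-- stated objective: faster
-- what changed: Instead of recomputing the wrapped cell value i+x+y for each of the 25 (y,x) tile pairs inside nested loops, B precomputes per input row the nine shifted/wrapped row variants (shift s = x+y ranges over 0..8) and builds each output row as a concatenation of five of these precomputed lists.
import Mathlib
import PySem

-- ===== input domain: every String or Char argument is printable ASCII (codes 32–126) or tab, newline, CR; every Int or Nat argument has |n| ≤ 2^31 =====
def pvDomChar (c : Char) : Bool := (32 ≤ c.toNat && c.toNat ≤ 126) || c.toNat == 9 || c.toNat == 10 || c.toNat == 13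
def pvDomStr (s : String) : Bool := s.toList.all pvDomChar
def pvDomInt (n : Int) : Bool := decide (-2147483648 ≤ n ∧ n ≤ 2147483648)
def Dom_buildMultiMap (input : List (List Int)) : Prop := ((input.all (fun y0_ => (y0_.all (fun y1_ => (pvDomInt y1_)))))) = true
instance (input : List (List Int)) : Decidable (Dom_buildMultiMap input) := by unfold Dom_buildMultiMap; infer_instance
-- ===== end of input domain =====

-- B precomputes each input row's nine shifted/wrapped variants once and assembles every
-- output row by concatenating five of them, instead of recomputing the wrap per (y, x) pair.

-- ===== PORT A =====
def buildMultiMap (input : List (List Int)) : List (List Int) :=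
  (PySem.List.pyRange 0 5 1).foldl (fun output y =>
    input.foldl (fun output inputRow =>
      let outputRow := (PySem.List.pyRange 0 5 1).foldl (fun outputRow x =>
        outputRow ++ inputRow.map (fun i =>
          if i + x + y > 9 then i + x + y - 9 else i + x + y)) ([] : List Int)
      output ++ [outputRow]) output) []

-- ===== PORT B =====
-- the indices y .. y+4 are always in range 0..8, where pyGetD is exact Python indexing
def buildMultiMap_alt (input : List (List Int)) : List (List Int) :=
  let tables := input.map (fun row =>
    (PySem.List.pyRange 0 9 1).map (fun s => row.map (fun i =>
      if i + s > 9 then i + s - 9 else i + s)))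
  (PySem.List.pyRange 0 5 1).flatMap (fun y => tables.map (fun t =>
    PySem.List.pyGetD t y [] ++ PySem.List.pyGetD t (y + 1) [] ++
    PySem.List.pyGetD t (y + 2) [] ++ PySem.List.pyGetD t (y + 3) [] ++
    PySem.List.pyGetD t (y + 4) []))

-- ===== PRECONDITION & SPEC =====
def Spec_buildMultiMap (input : List (List Int)) (out : List (List Int)) : Prop := out = buildMultiMap_alt input
instance (input : List (List Int)) (out : List (List Int)) : Decidable (Spec_buildMultiMap input out) := by unfold Spec_buildMultiMap; infer_instance

-- ===== CLAIM (what is proved, stated in full; the proofs are below) =====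
def Claim_equal_buildMultiMap : Prop := ∀ (input : List (List Int)), Dom_buildMultiMap input → Spec_buildMultiMap input (buildMultiMap input)

-- ===== LEMMAS AND PROOFS =====

-- ===== VERDICT (by name: the statement is the Claim_ definition above) =====
theorem buildMultiMap_spec : Claim_equal_buildMultiMap := by
  intro input _
  show buildMultiMap input = buildMultiMap_alt input
  have h5 : PySem.List.pyRange 0 5 1 = [0,1,2,3,4] := by decide
  have h9 : PySem.List.pyRange 0 9 1 = [0,1,2,3,4,5,6,7,8] := by decide
  have hassoc : ∀ x y : Int, (fun i : Int => if i + x + y > 9 then i + x + y - 9 else i + x + y)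
      = (fun i : Int => if i + (x + y) > 9 then i + (x + y) - 9 else i + (x + y)) := by
    intro x y; funext i; rw [add_assoc]
  simp only [buildMultiMap, buildMultiMap_alt, h5, h9, List.foldl, List.flatMap, List.map,
    List.map_map, hassoc, PySem.List.foldl_append_singleton_eq_map,
    PySem.List.pyGetD, PySem.List.pyGet?, PySem.List.pyIdx?]
  norm_num [Function.comp_def, Int.toNat]
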